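-- pv_equiv track=rewrite | github.com/Monish988/Blood-Bridge | flask_server/ai_engine.py | get_can_donate_to
-- ===== SOURCE A (Python) =====
-- VALID_BLOOD_GROUPS = ["A+", "A-", "B+", "B-", "AB+", "AB-", "O+", "O-"]
--
-- COMPATIBILITY_MATRIX = {
--     "A+": ["A+", "A-", "O+", "O-"],
--     "A-": ["A-", "O-"],
--     "B+": ["B+", "B-", "O+", "O-"],
--     "B-": ["B-", "O-"],
--     "AB+": ["A+", "A-", "B+", "B-", "AB+", "AB-", "O+", "O-"],
--     "AB-": ["A-", "B-", "AB-", "O-"],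
--     "O+": ["O+", "O-"],
--     "O-": ["O-"]
-- }
--
-- def is_valid_blood_group(blood_group):
--     """
--     Check if a blood group is valid.
--
--     Args:
--         blood_group (str): Blood group to validate
--
--     Returns:
--         bool: True if valid, False otherwise
--     """
--     return blood_group in VALID_BLOOD_GROUPS
--
-- def get_can_donate_to(donor_blood_group):
--     """
--     Get all blood groups that a specific donor can donate to.
--
--     Args:
--         donor_blood_group (str): Blood group of the donor
--
--     Returns:
--         list: List of blood groups the donor can donate to
--     """
--     if not is_valid_blood_group(donor_blood_group):
--         return []
--
--     can_donate_to = []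
--     for recipient_bg, compatible_donors in COMPATIBILITY_MATRIX.items():
--         if donor_blood_group in compatible_donors:
--             can_donate_to.append(recipient_bg)
--
--     return can_donate_to
-- ===== SOURCE B (Python) =====
-- # Precomputed donor -> recipients map: one dict lookup, no loop.
-- DONATE_MAP = {
--     "A+": ["A+", "AB+"],
--     "A-": ["A+", "A-", "AB+", "AB-"],
--     "B+": ["B+", "AB+"],
--     "B-": ["B+", "B-", "AB+", "AB-"],
--     "AB+": ["AB+"],
--     "AB-": ["AB+", "AB-"],
--     "O+": ["A+", "B+", "AB+", "O+"],
--     "O-": ["A+", "A-", "B+", "B-", "AB+", "AB-", "O+", "O-"],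
-- }
--
-- def get_can_donate_to(donor_blood_group):
--     return list(DONATE_MAP.get(donor_blood_group, []))
-- ===== Notes on version B (the rewrite author's own statement) =====
-- stated objective: simpler
-- what changed: Replaces the validity check plus a scan over COMPATIBILITY_MATRIX testing list membership with a single lookup in a precomputed donor-to-recipients map.
import Mathlib
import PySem

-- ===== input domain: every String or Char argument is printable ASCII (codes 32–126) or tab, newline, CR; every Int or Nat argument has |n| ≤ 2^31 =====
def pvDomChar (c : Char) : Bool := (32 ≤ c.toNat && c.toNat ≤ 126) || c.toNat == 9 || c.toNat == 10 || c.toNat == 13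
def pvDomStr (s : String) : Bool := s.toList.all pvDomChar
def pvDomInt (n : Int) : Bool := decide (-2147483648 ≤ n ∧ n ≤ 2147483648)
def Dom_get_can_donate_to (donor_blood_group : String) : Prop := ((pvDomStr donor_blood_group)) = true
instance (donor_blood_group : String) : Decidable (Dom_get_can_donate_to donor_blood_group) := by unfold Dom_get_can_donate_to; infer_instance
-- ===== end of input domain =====

-- ===== PORT A =====
def VALID_BLOOD_GROUPS : List String := ["A+", "A-", "B+", "B-", "AB+", "AB-", "O+", "O-"]

def COMPATIBILITY_MATRIX : PySem.Dict String (List String) :=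
  PySem.Dict.ofList [
    ("A+", ["A+", "A-", "O+", "O-"]),
    ("A-", ["A-", "O-"]),
    ("B+", ["B+", "B-", "O+", "O-"]),
    ("B-", ["B-", "O-"]),
    ("AB+", ["A+", "A-", "B+", "B-", "AB+", "AB-", "O+", "O-"]),
    ("AB-", ["A-", "B-", "AB-", "O-"]),
    ("O+", ["O+", "O-"]),
    ("O-", ["O-"])]

def is_valid_blood_group (blood_group : String) : Bool :=
  VALID_BLOOD_GROUPS.contains blood_group

def get_can_donate_to (donor_blood_group : String) : List String :=
  if ¬ is_valid_blood_group donor_blood_group then []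
  else
    COMPATIBILITY_MATRIX.items.foldl
      (fun can_donate_to kv =>
        if kv.2.contains donor_blood_group then can_donate_to ++ [kv.1] else can_donate_to)
      []

-- ===== PORT B =====
-- B: one lookup in a precomputed donor -> recipients map (no loop, no validity scan).
def DONATE_MAP : PySem.Dict String (List String) :=
  PySem.Dict.ofList [
    ("A+", ["A+", "AB+"]),
    ("A-", ["A+", "A-", "AB+", "AB-"]),
    ("B+", ["B+", "AB+"]),
    ("B-", ["B+", "B-", "AB+", "AB-"]),
    ("AB+", ["AB+"]),
    ("AB-", ["AB+", "AB-"]),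
    ("O+", ["A+", "B+", "AB+", "O+"]),
    ("O-", ["A+", "A-", "B+", "B-", "AB+", "AB-", "O+", "O-"])]

def get_can_donate_to_alt (donor_blood_group : String) : List String :=
  DONATE_MAP.getD donor_blood_group []


-- ===== PRECONDITION & SPEC =====
def Spec_get_can_donate_to (donor_blood_group : String) (out : List String) : Prop := out = get_can_donate_to_alt donor_blood_group
instance (donor_blood_group : String) (out : List String) : Decidable (Spec_get_can_donate_to donor_blood_group out) := by unfold Spec_get_can_donate_to; infer_instance

-- ===== CLAIM (what is proved, stated in full; the proofs are below) =====
def Claim_equal_get_can_donate_to : Prop := ∀ (donor_blood_group : String), Dom_get_can_donate_to donor_blood_group → Spec_get_can_donate_to donor_blood_group (get_can_donate_to donor_blood_group)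

-- ===== LEMMAS AND PROOFS =====

-- ===== VERDICT (by name: the statement is the Claim_ definition above) =====
theorem get_can_donate_to_spec : Claim_equal_get_can_donate_to := by
  intro s _
  unfold Spec_get_can_donate_to
  by_cases h1 : s = "A+"; · subst h1; decide
  by_cases h2 : s = "A-"; · subst h2; decide
  by_cases h3 : s = "B+"; · subst h3; decide
  by_cases h4 : s = "B-"; · subst h4; decide
  by_cases h5 : s = "AB+"; · subst h5; decide
  by_cases h6 : s = "AB-"; · subst h6; decide
  by_cases h7 : s = "O+"; · subst h7; decide
  by_cases h8 : s = "O-"; · subst h8; decide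
  have g : ∀ t : String, s ≠ t → (t == s) = false := fun t ht => by
    exact beq_eq_false_iff_ne.mpr (Ne.symm ht)
  simp [get_can_donate_to, get_can_donate_to_alt, is_valid_blood_group, VALID_BLOOD_GROUPS,
    COMPATIBILITY_MATRIX, DONATE_MAP, PySem.Dict.getD, PySem.Dict.get?, PySem.Dict.ofList,
    PySem.Dict.update, PySem.Dict.insert, PySem.Dict.contains, PySem.Dict.empty, List.find?,
    h1, h2, h3, h4, h5, h6, h7, h8,
    g _ h1, g _ h2, g _ h3, g _ h4, g _ h5, g _ h6, g _ h7, g _ h8]
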